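-- pv_equiv track=rewrite | github.com/bekirdag/gpt-creator | scripts/python/write_task_prompt.py | parse_context_sections
-- ===== SOURCE A (Python) =====
-- def parse_context_sections(blob: str) -> list[tuple[str, str]]:
--     sections: list[tuple[str, str]] = []
--     current_title = "Overview"
--     current_lines: list[str] = []
--     for line in blob.splitlines():
--         if line.startswith("## "):
--             if current_lines:
--                 sections.append((current_title, "\n".join(current_lines).strip()))
--             current_title = line[3:].strip() or "Section"
--             current_lines = []
--         elif line.startswith("# "):
--             continue
--         else:
--             current_lines.append(line)
--     if current_lines:
--         sections.append((current_title, "\n".join(current_lines).strip()))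
--     deduped: list[tuple[str, str]] = []
--     seen = set()
--     for title, text in sections:
--         key = (title, text[:200])
--         if key in seen:
--             continue
--         seen.add(key)
--         deduped.append((title, text))
--     return deduped
-- ===== SOURCE B (Python) =====
-- def parse_context_sections(blob: str) -> list[tuple[str, str]]:
--     lines = [l for l in blob.splitlines() if not l.startswith("# ")]
--     cuts = [(i, l) for i, l in enumerate(lines) if l.startswith("## ")]
--     headers = [(-1, "")] + cuts
--     ends = [i for i, _ in cuts] + [len(lines)]
--     picked: dict[tuple[str, str], tuple[str, str]] = {}
--     for (s, hdr), e in zip(headers, ends):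
--         body = lines[s + 1:e]
--         if body:
--             title = "Overview" if s < 0 else (hdr[3:].strip() or "Section")
--             text = "\n".join(body).strip()
--             picked.setdefault((title, text[:200]), (title, text))
--     return list(picked.values())
-- ===== Notes on version B (the rewrite author's own statement) =====
-- stated objective: alternative
-- what changed: Replaces A's line-by-line state machine plus separate set-based dedup pass with an index-based algorithm: pre-filter comment lines, locate header positions with enumerate, slice each section body out by index range via zip of consecutive cut points, and deduplicate with a dict setdefault keyed by title and truncated text.
import Mathlib
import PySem

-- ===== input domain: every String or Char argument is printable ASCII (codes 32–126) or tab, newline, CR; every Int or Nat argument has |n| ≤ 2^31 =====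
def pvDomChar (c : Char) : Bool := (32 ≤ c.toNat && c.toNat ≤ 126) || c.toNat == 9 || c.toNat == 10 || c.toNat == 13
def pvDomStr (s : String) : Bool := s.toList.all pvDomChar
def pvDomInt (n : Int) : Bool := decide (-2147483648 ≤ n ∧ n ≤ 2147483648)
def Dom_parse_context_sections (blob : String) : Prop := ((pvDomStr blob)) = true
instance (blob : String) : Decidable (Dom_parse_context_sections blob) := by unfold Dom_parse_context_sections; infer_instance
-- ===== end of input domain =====

set_option maxHeartbeats 1000000


-- B replaces A's streaming state machine + second dedup pass by an index-based algorithm: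
-- pre-filter comment lines, find header cut positions, slice bodies by index ranges, dedup via dict setdefault. Objective: alternative.

-- shared text helpers: "\n".join(lines).strip() and (line[3:].strip() or "Section")
def pvAText (cur : List String) : String := PySem.Str.strip (PySem.Str.join "\n" cur)
def pvTitle (l : String) : String :=
  let t := PySem.Str.strip (PySem.Str.slice l (some 3) none)
  if t = "" then "Section" else t

-- ===== PORT A =====
-- A's parsing loop: state (sections, current_title, current_lines)
def pvALoop : List String → List (String × String) → String → List String →
    List (String × String) × String × List String
  | [], secs, t, c => (secs, t, c)
  | line :: rest, secs, t, c =>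
    if PySem.Str.startswith line "## " then
      let secs' := if c.isEmpty then secs else secs ++ [(t, pvAText c)]
      pvALoop rest secs' (pvTitle line) []
    else if PySem.Str.startswith line "# " then
      pvALoop rest secs t c
    else
      pvALoop rest secs t (c ++ [line])

-- A's dedup loop: state (deduped, seen)
def pvADedup : List (String × String) → List (String × String) → PySem.Set (String × String) →
    List (String × String)
  | [], ded, _ => ded
  | (title, text) :: rest, ded, seen =>
    let key := (title, PySem.Str.slice text none (some 200))
    if PySem.Set.contains seen key then
      pvADedup rest ded seen
    else
      pvADedup rest (ded ++ [(title, text)]) (PySem.Set.add seen key)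

def parse_context_sections (blob : String) : List (String × String) :=
  let (secs, t, c) := pvALoop (PySem.Str.splitlines blob) [] "Overview" []
  let secs := if c.isEmpty then secs else secs ++ [(t, pvAText c)]
  pvADedup secs [] PySem.Set.empty

-- ===== PORT B =====
def parse_context_sections_alt (blob : String) : List (String × String) :=
  let lines := (PySem.Str.splitlines blob).filter (fun l => !(PySem.Str.startswith l "# "))
  let cuts := (PySem.List.enumerate lines).filter (fun p => PySem.Str.startswith p.2 "## ")
  let headers := ((-1 : Int), "") :: cuts
  let ends := cuts.map (fun p => p.1) ++ [(lines.length : Int)]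
  let picked := (headers.zip ends).foldl
    (fun d pe =>
      let body := PySem.List.slice lines (some (pe.1.1 + 1)) (some pe.2)
      if body.isEmpty then d
      else
        let title := if pe.1.1 < 0 then "Overview" else pvTitle pe.1.2
        let text := pvAText body
        PySem.Dict.setdefault d (title, PySem.Str.slice text none (some 200)) (title, text))
    PySem.Dict.empty
  picked.values

-- ===== PRECONDITION & SPEC =====
def Spec_parse_context_sections (blob : String) (out : List (String × String)) : Prop := out = parse_context_sections_alt blob
instance (blob : String) (out : List (String × String)) : Decidable (Spec_parse_context_sections blob out) := by unfold Spec_parse_context_sections; infer_instance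

-- ===== CLAIM (what is proved, stated in full; the proofs are below) =====
def Claim_equal_parse_context_sections : Prop := ∀ (blob : String), Dom_parse_context_sections blob → Spec_parse_context_sections blob (parse_context_sections blob)

-- ===== LEMMAS AND PROOFS =====

-- proof-side abstractions (used only below)

-- A's result truncated to the final sections list (flush of the trailing section included)
def pvAFull (L : List String) (t : String) (c : List String) : List (String × String) :=
  match pvALoop L [] t c with
  | (secs, t', c') => if c'.isEmpty then secs else secs ++ [(t', pvAText c')]

-- common recursive characterisation of the section list (on "# "-free lines)
def pvSpecLoop : List String → String → List String → List (String × String)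
  | [], t, c => if c.isEmpty then [] else [(t, pvAText c)]
  | l :: rest, t, c =>
    if PySem.Str.startswith l "## " then
      (if c.isEmpty then [] else [(t, pvAText c)]) ++ pvSpecLoop rest (pvTitle l) []
    else
      pvSpecLoop rest t (c ++ [l])

-- A's dedup step, as one fold step
def pvStep (st : List (String × String) × PySem.Set (String × String)) (sec : String × String) :
    List (String × String) × PySem.Set (String × String) :=
  let key := (sec.1, PySem.Str.slice sec.2 none (some 200))
  if PySem.Set.contains st.2 key then st
  else (st.1 ++ [sec], PySem.Set.add st.2 key)

-- B's dedup step (dict setdefault)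
def pvDStep (d : PySem.Dict (String × String) (String × String)) (sec : String × String) :
    PySem.Dict (String × String) (String × String) :=
  PySem.Dict.setdefault d (sec.1, PySem.Str.slice sec.2 none (some 200)) sec

-- B-side abstractions
def pvCuts (L : List String) : List (Int × String) :=
  (PySem.List.enumerate L).filter (fun p => PySem.Str.startswith p.2 "## ")

def pvPairsS (L : List String) (s0 : String) : List ((Int × String) × Int) :=
  (((-1 : Int), s0) :: pvCuts L).zip ((pvCuts L).map (fun p => p.1) ++ [(L.length : Int)])

def pvBody (L : List String) (pe : (Int × String) × Int) : List String :=
  PySem.List.slice L (some (pe.1.1 + 1)) (some pe.2)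

def pvSec (t0 : String) (L : List String) (pe : (Int × String) × Int) : String × String :=
  ((if pe.1.1 < 0 then t0 else pvTitle pe.1.2), pvAText (pvBody L pe))

def pvSlistG (L : List String) (s0 t0 : String) : List (String × String) :=
  ((pvPairsS L s0).filter (fun pe => !(pvBody L pe).isEmpty)).map (pvSec t0 L)

-- a "## " line never starts with "# "
theorem pv_hdr_not_hash (l : String) (h : PySem.Str.startswith l "## " = true) :
    PySem.Str.startswith l "# " = false := by
  rw [PySem.Str.startswith_eq] at h ⊢
  have h' := (PySem.Chars.startswith_iff _ _).1 h
  rw [show "## ".toList = ['#', '#', ' '] from by decide] at h'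
  obtain ⟨u, hu⟩ := h'
  cases hF : PySem.Chars.startswith l.toList "# ".toList
  · rfl
  · exfalso
    have h2 := (PySem.Chars.startswith_iff _ _).1 hF
    rw [show "# ".toList = ['#', ' '] from by decide] at h2
    obtain ⟨w, hw⟩ := h2
    rw [← hu] at hw
    simp at hw

-- A's streaming loop ignores "# " lines
theorem pvALoop_filter : ∀ (lines : List String) (secs : List (String × String)) (t : String) (c : List String),
    pvALoop lines secs t c = pvALoop (lines.filter (fun l => !(PySem.Str.startswith l "# "))) secs t c := by
  intro lines
  induction lines with
  | nil => intro secs t c; rfl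
  | cons l rest ih =>
    intro secs t c
    by_cases h2 : PySem.Str.startswith l "## " = true
    · have h1 := pv_hdr_not_hash l h2
      rw [List.filter_cons]
      simp only [h1, Bool.not_false, if_true]
      simp only [pvALoop, h2, if_true]
      exact ih _ _ _
    · by_cases h1 : PySem.Str.startswith l "# " = true
      · rw [List.filter_cons]
        simp only [h1, Bool.not_true, Bool.false_eq_true, if_false]
        simp only [pvALoop, h2, h1, Bool.false_eq_true, if_false, if_true]
        exact ih _ _ _
      · rw [List.filter_cons]
        simp only [eq_false_of_ne_true h1, Bool.not_false, if_true]
        simp only [pvALoop, h2, eq_false_of_ne_true h1, Bool.false_eq_true, if_false]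
        exact ih _ _ _

-- accumulator lemma for pvALoop
theorem pvALoop_acc : ∀ (lines : List String) (secs : List (String × String)) (t : String) (c : List String),
    pvALoop lines secs t c =
      (secs ++ (pvALoop lines [] t c).1, (pvALoop lines [] t c).2.1, (pvALoop lines [] t c).2.2) := by
  intro lines
  induction lines with
  | nil => intro secs t c; simp [pvALoop]
  | cons line rest ih =>
    intro secs t c
    simp only [pvALoop]
    split
    · by_cases hc : c.isEmpty
      · simp only [hc, if_true]
        exact ih secs _ []
      · simp only [hc, Bool.false_eq_true, if_false, List.nil_append]
        rw [ih (secs ++ [(t, pvAText c)]), ih ([(t, pvAText c)])]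
        simp
    · split
      · exact ih secs t c
      · exact ih secs t (c ++ [line])

-- on "# "-free lines, A's full parse is pvSpecLoop
theorem pvAFull_eq_spec : ∀ (L : List String) (t : String) (c : List String),
    (∀ l ∈ L, PySem.Str.startswith l "# " = false) → pvAFull L t c = pvSpecLoop L t c := by
  intro L
  induction L with
  | nil => intro t c _; simp [pvAFull, pvALoop, pvSpecLoop]
  | cons l rest ih =>
    intro t c hk
    have hkrest : ∀ x ∈ rest, PySem.Str.startswith x "# " = false := fun x hx => hk x (List.mem_cons_of_mem _ hx)
    by_cases h2 : PySem.Str.startswith l "## " = true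
    · simp only [pvAFull, pvALoop, pvSpecLoop, h2, if_true]
      by_cases hc : c.isEmpty
      · simp only [hc, if_true, List.nil_append]
        exact ih (pvTitle l) [] hkrest
      · simp only [hc, Bool.false_eq_true, if_false, List.nil_append]
        rw [pvALoop_acc rest [(t, pvAText c)] (pvTitle l) []]
        have := ih (pvTitle l) [] hkrest
        simp only [pvAFull] at this
        rcases hA : pvALoop rest [] (pvTitle l) [] with ⟨s', t', c'⟩
        rw [hA] at this
        simp only []
        by_cases hc' : c'.isEmpty
        · simp only [hc', if_true] at this ⊢
          rw [← this]
        · simp only [hc', Bool.false_eq_true, if_false] at this ⊢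
          rw [List.append_assoc, ← this]
    · have h1 : PySem.Str.startswith l "# " = false := hk l (List.mem_cons_self)
      simp only [pvAFull, pvALoop, pvSpecLoop, h2, h1, Bool.false_eq_true, if_false]
      exact ih t (c ++ [l]) hkrest

-- A's dedup loop as a fold
theorem pvADedup_eq_foldl : ∀ (xs : List (String × String)) (ded : List (String × String)) (seen : PySem.Set (String × String)),
    pvADedup xs ded seen = (xs.foldl pvStep (ded, seen)).1 := by
  intro xs
  induction xs with
  | nil => intro ded seen; rfl
  | cons sec rest ih =>
    intro ded seen
    obtain ⟨title, text⟩ := sec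
    simp only [pvADedup, pvStep, List.foldl_cons]
    split <;> simp_all

-- A characterised
theorem pvA_char (blob : String) :
    parse_context_sections blob =
      ((pvSpecLoop ((PySem.Str.splitlines blob).filter (fun l => !(PySem.Str.startswith l "# "))) "Overview" []).foldl
        pvStep ([], PySem.Set.empty)).1 := by
  have h1 : parse_context_sections blob =
      pvADedup (pvAFull (PySem.Str.splitlines blob) "Overview" []) [] PySem.Set.empty := by
    rfl
  rw [h1, pvADedup_eq_foldl]
  have h2 : pvAFull (PySem.Str.splitlines blob) "Overview" [] =
      pvAFull ((PySem.Str.splitlines blob).filter (fun l => !(PySem.Str.startswith l "# "))) "Overview" [] := by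
    unfold pvAFull
    rw [pvALoop_filter (PySem.Str.splitlines blob) [] "Overview" []]
  rw [h2, pvAFull_eq_spec]
  intro l hl
  have := List.of_mem_filter hl
  simpa using this

-- a fold that skips on p equals a fold over the complement filter
theorem pv_foldl_skip {α δ : Type} (p : α → Bool) (f : δ → α → δ) (l : List α) (init : δ) :
    l.foldl (fun acc x => if p x then acc else f acc x) init = (l.filter (fun x => !p x)).foldl f init := by
  have hfun : (fun (acc : δ) x => if p x then acc else f acc x) =
      (fun (acc : δ) x => if (!p x) = true then f acc x else acc) := by
    funext acc x
    cases h : p x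
    · simp [h]
    · simp
  rw [hfun, PySem.List.foldl_if_eq_foldl_filter]

-- B characterised
theorem pvB_char (blob : String) :
    parse_context_sections_alt blob =
      ((pvSlistG ((PySem.Str.splitlines blob).filter (fun l => !(PySem.Str.startswith l "# "))) "" "Overview").foldl
        pvDStep PySem.Dict.empty).values := by
  simp only [parse_context_sections_alt, pvSlistG, pvPairsS, pvCuts, List.foldl_map]
  rw [show (fun (d : PySem.Dict (String × String) (String × String)) (pe : (Int × String) × Int) =>
      let body := PySem.List.slice ((PySem.Str.splitlines blob).filter (fun l => !(PySem.Str.startswith l "# "))) (some (pe.1.1 + 1)) (some pe.2)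
      if body.isEmpty then d
      else
        let title := if pe.1.1 < 0 then "Overview" else pvTitle pe.1.2
        let text := pvAText body
        PySem.Dict.setdefault d (title, PySem.Str.slice text none (some 200)) (title, text)) =
    (fun d pe => if (pvBody ((PySem.Str.splitlines blob).filter (fun l => !(PySem.Str.startswith l "# "))) pe).isEmpty
      then d else pvDStep d (pvSec "Overview" ((PySem.Str.splitlines blob).filter (fun l => !(PySem.Str.startswith l "# "))) pe)) from rfl]
  rw [pv_foldl_skip]

-- cuts of a header-free list are empty
theorem pvCuts_nil (L : List String) (h : ∀ l ∈ L, PySem.Str.startswith l "## " = false) :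
    pvCuts L = [] := by
  apply List.filter_eq_nil_iff.mpr
  intro p hp
  have hmem : p.2 ∈ L := by
    rw [PySem.List.mem_enumerate_iff] at hp
    obtain ⟨k, hk, rfl⟩ := hp
    exact List.getElem_mem _
  have hx := h p.2 hmem
  simp only [hx, Bool.false_eq_true, not_false_eq_true]

-- enumerate at shifted start
theorem pv_enum_shift {α : Type} : ∀ (xs : List α) (s : Int),
    PySem.List.enumerate xs s = (PySem.List.enumerate xs 0).map (fun p => (p.1 + s, p.2)) := by
  intro xs
  induction xs with
  | nil => intro s; simp [PySem.List.enumerate_nil]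
  | cons x xs ih =>
    intro s
    rw [PySem.List.enumerate_cons, PySem.List.enumerate_cons]
    simp only [zero_add]
    rw [ih (s + 1), ih 1]
    simp only [List.map_cons, List.map_map, List.cons.injEq]
    refine ⟨by norm_num, ?_⟩
    apply List.map_congr_left
    intro p _
    simp only [Function.comp, Prod.mk.injEq]
    exact ⟨by ring, trivial⟩

-- cuts of a decomposed list
theorem pvCuts_decomp (P T : List String) (hdr : String)
    (hP : ∀ l ∈ P, PySem.Str.startswith l "## " = false)
    (hh : PySem.Str.startswith hdr "## " = true) :
    pvCuts (P ++ hdr :: T) = ((P.length : Int), hdr) ::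
      (pvCuts T).map (fun q => (q.1 + ((P.length : Int) + 1), q.2)) := by
  unfold pvCuts
  rw [show PySem.List.enumerate (P ++ hdr :: T) = PySem.List.enumerate (P ++ hdr :: T) 0 from rfl,
    PySem.List.enumerate_append, List.filter_append]
  have h1 : (PySem.List.enumerate P 0).filter (fun p => PySem.Str.startswith p.2 "## ") = [] := by
    apply List.filter_eq_nil_iff.mpr
    intro p hp
    have hmem : p.2 ∈ P := by
      rw [PySem.List.mem_enumerate_iff] at hp
      obtain ⟨k, hk, rfl⟩ := hp
      exact List.getElem_mem _
    have hx := hP p.2 hmem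
    simp only [hx, Bool.false_eq_true, not_false_eq_true]
  rw [h1, List.nil_append, PySem.List.enumerate_cons, List.filter_cons]
  simp only [hh, if_true]
  rw [pv_enum_shift T (0 + (P.length : Int) + 1), List.filter_map]
  have hcomp : ((fun p : Int × String => PySem.Str.startswith p.2 "## ") ∘
      (fun p : Int × String => (p.1 + (0 + (P.length : Int) + 1), p.2))) =
      (fun p : Int × String => PySem.Str.startswith p.2 "## ") := by
    funext p; rfl
  rw [hcomp]
  simp only [zero_add]

-- membership facts for pairs
theorem pv_mem_pairs (L : List String) (s0 : String) (pe : (Int × String) × Int)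
    (hpe : pe ∈ pvPairsS L s0) :
    (pe.1 = ((-1 : Int), s0) ∨ 0 ≤ pe.1.1) ∧ 0 ≤ pe.2 := by
  have hz := List.of_mem_zip hpe
  obtain ⟨hl, hr⟩ := hz
  have hcut : ∀ q ∈ pvCuts L, (0 : Int) ≤ q.1 := by
    intro q hq
    have hq' := (List.mem_filter.mp hq).1
    rw [PySem.List.mem_enumerate_iff] at hq'
    obtain ⟨k, hk, rfl⟩ := hq'
    simp
  constructor
  · rcases List.mem_cons.mp hl with h | h
    · left; exact h
    · right; exact hcut _ h
  · rcases List.mem_append.mp hr with h | h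
    · obtain ⟨q, hq, hEq⟩ := List.mem_map.mp h
      rw [← hEq]; exact hcut _ hq
    · have hE : pe.2 = (L.length : Int) := by simpa using h
      rw [hE]; exact Int.natCast_nonneg _

-- body under index shift
theorem pvBody_shift (P T : List String) (hdr : String) (pe : (Int × String) × Int)
    (ha : -1 ≤ pe.1.1) (hb : 0 ≤ pe.2) :
    pvBody (P ++ hdr :: T) ((pe.1.1 + ((P.length : Int) + 1), pe.1.2), pe.2 + ((P.length : Int) + 1)) =
      pvBody T pe := by
  unfold pvBody
  dsimp only
  rw [PySem.List.slice_toNat _ (by omega) (by omega), PySem.List.slice_toNat _ (by omega) hb]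
  have h2 : (pe.2 + ((P.length : Int) + 1)).toNat - (pe.1.1 + ((P.length : Int) + 1) + 1).toNat =
      pe.2.toNat - (pe.1.1 + 1).toNat := by omega
  have h1 : (pe.1.1 + ((P.length : Int) + 1) + 1).toNat = P.length + 1 + (pe.1.1 + 1).toNat := by omega
  rw [h2, h1, List.drop_append]
  have h3 : List.drop (P.length + 1 + (pe.1.1 + 1).toNat) P = [] :=
    List.drop_eq_nil_of_le (by omega)
  have h4 : P.length + 1 + (pe.1.1 + 1).toNat - P.length = (pe.1.1 + 1).toNat + 1 := by omega
  rw [h3, h4, List.nil_append, List.drop_succ_cons]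

-- the first (sentinel) body is exactly P
theorem pvBody_head' (P T : List String) (hdr s0 : String) :
    pvBody (P ++ hdr :: T) (((-1 : Int), s0), (P.length : Int)) = P := by
  unfold pvBody
  rw [show ((-1 : Int) + 1) = ((0 : Nat) : Int) from by norm_num, PySem.List.slice_natCast]
  simp

-- pairs of a decomposed list
theorem pvPairs_decomp (P T : List String) (hdr s0 : String)
    (hP : ∀ l ∈ P, PySem.Str.startswith l "## " = false)
    (hh : PySem.Str.startswith hdr "## " = true) :
    pvPairsS (P ++ hdr :: T) s0 = ((((-1 : Int), s0), (P.length : Int))) ::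
      (pvPairsS T hdr).map (fun pe => ((pe.1.1 + ((P.length : Int) + 1), pe.1.2), pe.2 + ((P.length : Int) + 1))) := by
  have hfun : (fun (pe : (Int × String) × Int) =>
      ((pe.1.1 + ((P.length : Int) + 1), pe.1.2), pe.2 + ((P.length : Int) + 1))) =
      Prod.map (fun (h : Int × String) => (h.1 + ((P.length : Int) + 1), h.2))
        (fun (e : Int) => e + ((P.length : Int) + 1)) := by
    funext pe; rcases pe with ⟨⟨a, b⟩, e⟩; rfl
  unfold pvPairsS
  rw [pvCuts_decomp P T hdr hP hh, hfun, ← List.zip_map]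
  simp only [List.map_cons, List.map_map, List.map_append, List.map_nil, List.cons_append]
  rw [List.zip_cons_cons]
  congr 1
  congr 1
  · norm_num
  · have hm2 : List.map ((fun (p : Int × String) => p.1) ∘ (fun q : Int × String => (q.1 + ((P.length : Int) + 1), q.2))) (pvCuts T) =
        List.map ((fun (e : Int) => e + ((P.length : Int) + 1)) ∘ (fun (p : Int × String) => p.1)) (pvCuts T) :=
      List.map_congr_left (fun q _ => rfl)
    rw [hm2, show ((P ++ hdr :: T).length : Int) = (T.length : Int) + ((P.length : Int) + 1) from by
      simp only [List.length_append, List.length_cons]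
      push_cast
      ring]

-- section under shift
theorem pvSec_shift (P T : List String) (hdr t0 : String) (pe : (Int × String) × Int)
    (hpe : pe ∈ pvPairsS T hdr) :
    pvSec t0 (P ++ hdr :: T) ((pe.1.1 + ((P.length : Int) + 1), pe.1.2), pe.2 + ((P.length : Int) + 1)) =
      pvSec (pvTitle hdr) T pe := by
  obtain ⟨h1, h2⟩ := pv_mem_pairs T hdr pe hpe
  have ha : -1 ≤ pe.1.1 := by
    rcases h1 with h | h
    · simp [h]
    · omega
  unfold pvSec
  rw [pvBody_shift P T hdr pe ha h2]
  congr 1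
  rcases h1 with h | h
  · have hs : pe.1.1 = -1 := by rw [h]
    have hstr : pe.1.2 = hdr := by rw [h]
    rw [hs, hstr]
    norm_num
  · have hnl : ¬ (pe.1.1 + ((P.length : Int) + 1) < 0) := by omega
    have hn : ¬ (pe.1.1 < 0) := by omega
    simp [hnl, hn]

-- Slist of a decomposed list
theorem pvSlist_decomp (P T : List String) (hdr s0 t0 : String)
    (hP : ∀ l ∈ P, PySem.Str.startswith l "## " = false)
    (hh : PySem.Str.startswith hdr "## " = true) :
    pvSlistG (P ++ hdr :: T) s0 t0 =
      (if P.isEmpty then [] else [(t0, pvAText P)]) ++ pvSlistG T hdr (pvTitle hdr) := by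
  unfold pvSlistG
  rw [pvPairs_decomp P T hdr s0 hP hh]
  rw [List.filter_cons]
  have hbhead := pvBody_head' P T hdr s0
  have hfiltmap : ((pvPairsS T hdr).map (fun pe => ((pe.1.1 + ((P.length : Int) + 1), pe.1.2), pe.2 + ((P.length : Int) + 1)))).filter
      (fun pe => !(pvBody (P ++ hdr :: T) pe).isEmpty) =
      ((pvPairsS T hdr).filter (fun pe => !(pvBody T pe).isEmpty)).map
        (fun pe => ((pe.1.1 + ((P.length : Int) + 1), pe.1.2), pe.2 + ((P.length : Int) + 1))) := by
    rw [List.filter_map]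
    congr 1
    apply List.filter_congr
    intro pe hpe
    obtain ⟨h1, h2⟩ := pv_mem_pairs T hdr pe hpe
    have ha : -1 ≤ pe.1.1 := by
      rcases h1 with h | h
      · simp [h]
      · omega
    simp only [Function.comp]
    rw [pvBody_shift P T hdr pe ha h2]
  by_cases hPe : P.isEmpty
  · simp only [hbhead, hPe, Bool.not_true, Bool.false_eq_true, if_false, if_true, List.nil_append]
    rw [hfiltmap, List.map_map]
    apply List.map_congr_left
    intro pe hpe
    have hpe' : pe ∈ pvPairsS T hdr := List.mem_of_mem_filter hpe
    exact pvSec_shift P T hdr t0 pe hpe'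
  · simp only [hbhead, hPe, Bool.not_false, if_true, Bool.false_eq_true, if_false]
    rw [hfiltmap, List.map_cons, List.map_map]
    have hhead : pvSec t0 (P ++ hdr :: T) (((-1 : Int), s0), (P.length : Int)) = (t0, pvAText P) := by
      unfold pvSec
      dsimp only
      rw [hbhead]
      norm_num
    have htail : ((pvPairsS T hdr).filter (fun pe => !(pvBody T pe).isEmpty)).map
        ((pvSec t0 (P ++ hdr :: T)) ∘ (fun pe => ((pe.1.1 + ((P.length : Int) + 1), pe.1.2), pe.2 + ((P.length : Int) + 1)))) =
        ((pvPairsS T hdr).filter (fun pe => !(pvBody T pe).isEmpty)).map (pvSec (pvTitle hdr) T) := by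
      apply List.map_congr_left
      intro pe hpe
      have hpe' : pe ∈ pvPairsS T hdr := List.mem_of_mem_filter hpe
      exact pvSec_shift P T hdr t0 pe hpe'
    simp only [List.singleton_append]
    exact congrArg₂ List.cons hhead htail

-- Slist of a header-free list
theorem pvSlist_nohdr (L : List String) (s0 t0 : String)
    (h : ∀ l ∈ L, PySem.Str.startswith l "## " = false) :
    pvSlistG L s0 t0 = if L.isEmpty then [] else [(t0, pvAText L)] := by
  have hbody : pvBody L (((-1 : Int), s0), (L.length : Int)) = L := by
    unfold pvBody
    rw [show ((-1 : Int) + 1) = ((0 : Nat) : Int) from by norm_num, PySem.List.slice_natCast]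
    simp
  unfold pvSlistG
  rw [show pvPairsS L s0 = [(((-1 : Int), s0), (L.length : Int))] from by
    unfold pvPairsS
    rw [pvCuts_nil L h]
    simp]
  rw [List.filter_cons, hbody]
  by_cases hL : L.isEmpty
  · simp [hL]
  · simp [hL, pvSec, hbody]

-- pvSpecLoop over a header-free prefix
theorem pvSpec_nohdr : ∀ (P : List String) (rest : List String) (t : String) (c : List String),
    (∀ l ∈ P, PySem.Str.startswith l "## " = false) →
    pvSpecLoop (P ++ rest) t c = pvSpecLoop rest t (c ++ P) := by
  intro P
  induction P with
  | nil => intro rest t c _; simp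
  | cons l P' ih =>
    intro rest t c h
    have hl : PySem.Str.startswith l "## " = false := h l (List.mem_cons_self)
    simp only [List.cons_append, pvSpecLoop, hl, Bool.false_eq_true, if_false]
    rw [ih rest t (c ++ [l]) (fun x hx => h x (List.mem_cons_of_mem _ hx))]
    simp

-- head of a non-empty dropWhile fails the predicate
theorem pv_dropWhile_head_false {α : Type} (p : α → Bool) :
    ∀ (M : List α) (x : α) (xs : List α), M.dropWhile p = x :: xs → p x = false := by
  intro M
  induction M with
  | nil => intro x xs h; simp [List.dropWhile] at h
  | cons a M ihM =>
    intro x xs h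
    rw [List.dropWhile_cons] at h
    by_cases ha : p a = true
    · rw [if_pos ha] at h
      exact ihM x xs h
    · rw [if_neg ha] at h
      obtain ⟨h1, h2⟩ := List.cons.injEq a M x xs ▸ h
      rw [← h1]
      exact eq_false_of_ne_true ha

-- main parse equality, by strong induction on length
theorem pvSlist_eq_spec : ∀ (n : Nat) (L : List String), L.length ≤ n →
    ∀ (s0 t0 : String), pvSlistG L s0 t0 = pvSpecLoop L t0 [] := by
  intro n
  induction n with
  | zero =>
    intro L hL s0 t0
    have : L = [] := List.eq_nil_of_length_eq_zero (by omega)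
    subst this
    rw [pvSlist_nohdr [] s0 t0 (by simp)]
    simp [pvSpecLoop]
  | succ n ih =>
    intro L hL s0 t0
    have hsplit : L.takeWhile (fun l => !(PySem.Str.startswith l "## ")) ++
        L.dropWhile (fun l => !(PySem.Str.startswith l "## ")) = L := List.takeWhile_append_dropWhile
    have hPno : ∀ l ∈ L.takeWhile (fun l => !(PySem.Str.startswith l "## ")),
        PySem.Str.startswith l "## " = false := by
      intro l hl
      have := List.mem_takeWhile_imp hl
      simpa using this
    cases hRc : L.dropWhile (fun l => !(PySem.Str.startswith l "## ")) with
    | nil =>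
      have hLP : L = L.takeWhile (fun l => !(PySem.Str.startswith l "## ")) := by
        conv_lhs => rw [← hsplit]
        rw [hRc, List.append_nil]
      have hno : ∀ l ∈ L, PySem.Str.startswith l "## " = false := by
        intro l hl
        apply hPno
        rw [← hLP]
        exact hl
      rw [pvSlist_nohdr L s0 t0 hno]
      have h0 : pvSpecLoop (L ++ []) t0 [] = pvSpecLoop [] t0 ([] ++ L) := pvSpec_nohdr L [] t0 [] hno
      rw [List.append_nil, List.nil_append] at h0
      rw [h0]
      rfl
    | cons hdr T =>
      have hh : PySem.Str.startswith hdr "## " = true := by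
        have := pv_dropWhile_head_false (fun l => !(PySem.Str.startswith l "## ")) L hdr T hRc
        simpa using this
      have hLdec : L = L.takeWhile (fun l => !(PySem.Str.startswith l "## ")) ++ hdr :: T := by
        conv_lhs => rw [← hsplit]
        rw [hRc]
      have hlen : T.length ≤ n := by
        have := congrArg List.length hLdec
        simp [List.length_append] at this
        omega
      rw [hLdec]
      rw [pvSlist_decomp _ T hdr s0 t0 hPno hh]
      rw [ih T hlen hdr (pvTitle hdr)]
      rw [pvSpec_nohdr _ (hdr :: T) t0 [] hPno]
      simp only [List.nil_append, pvSpecLoop, hh, if_true]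

-- dedup bridge: set+list fold equals dict setdefault fold
theorem pv_dedup_dict : ∀ (S : List (String × String)) (ded : List (String × String))
    (seen : PySem.Set (String × String)) (d : PySem.Dict (String × String) (String × String)),
    ded = d.values → (∀ k, PySem.Set.contains seen k = d.contains k) →
    (S.foldl pvStep (ded, seen)).1 = (S.foldl pvDStep d).values := by
  have cdec : ∀ (s : PySem.Set (String × String)) (x : String × String),
      PySem.Set.contains s x = decide (x ∈ s) := by
    intro s x; simp [PySem.Set.contains]
  intro S
  induction S with
  | nil => intro ded seen d h1 _; simpa using h1
  | cons sec rest ih =>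
    intro ded seen d h1 h2
    obtain ⟨title, text⟩ := sec
    simp only [List.foldl_cons]
    by_cases hc : d.contains ((title, PySem.Str.slice text none (some 200))) = true
    · have hs : PySem.Set.contains seen ((title, PySem.Str.slice text none (some 200))) = true := by
        rw [h2]; exact hc
      have hsm : ((title, PySem.Str.slice text none (some 200))) ∈ seen := by
        rw [cdec] at hs; exact of_decide_eq_true hs
      rw [show pvStep (ded, seen) (title, text) = (ded, seen) from by simp [pvStep, hsm]]
      rw [show pvDStep d (title, text) = d from by
        simp [pvDStep]; exact PySem.Dict.setdefault_of_contains d _ hc]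
      exact ih ded seen d h1 h2
    · have hcf : d.contains ((title, PySem.Str.slice text none (some 200))) = false :=
        eq_false_of_ne_true hc
      have hs : PySem.Set.contains seen ((title, PySem.Str.slice text none (some 200))) = false := by
        rw [h2]; exact hcf
      have hsm : ((title, PySem.Str.slice text none (some 200))) ∉ seen := by
        rw [cdec] at hs; exact of_decide_eq_false hs
      rw [show pvStep (ded, seen) (title, text) =
          (ded ++ [(title, text)], PySem.Set.add seen ((title, PySem.Str.slice text none (some 200)))) from by
        simp [pvStep, hsm]]
      rw [show pvDStep d (title, text) =
          d.insert ((title, PySem.Str.slice text none (some 200))) (title, text) from by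
        simp [pvDStep]; exact PySem.Dict.setdefault_of_not_contains d _ hcf]
      apply ih
      · have hit := PySem.Dict.items_insert_of_not_contains d (title, text) hcf
        simp only [PySem.Dict.values] at h1 ⊢
        rw [hit, List.map_append, ← h1]
        simp
      · intro k'
        rw [PySem.Dict.contains_insert]
        by_cases hk : k' = ((title, PySem.Str.slice text none (some 200)))
        · rw [cdec]
          simp [hk]
        · have hkb : (k' == ((title, PySem.Str.slice text none (some 200)))) = false :=
            beq_eq_false_iff_ne.mpr hk
          rw [cdec]
          rw [show decide (k' ∈ PySem.Set.add seen ((title, PySem.Str.slice text none (some 200)))) =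
              decide (k' ∈ seen) from by simp [PySem.Set.mem_add, hk]]
          rw [← cdec, h2, hkb, Bool.false_or]

-- ===== VERDICT (by name: the statement is the Claim_ definition above) =====
theorem parse_context_sections_spec : Claim_equal_parse_context_sections := by
  intro blob _
  unfold Spec_parse_context_sections
  rw [pvA_char, pvB_char]
  rw [pvSlist_eq_spec ((PySem.Str.splitlines blob).filter (fun l => !(PySem.Str.startswith l "# "))).length _ le_rfl]
  apply pv_dedup_dict
  · rfl
  · intro k
    simp [PySem.Set.contains, PySem.Set.empty, PySem.Dict.contains_empty]
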